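-- pv_equiv track=rewrite | github.com/claudiavporto/Project-2-CSC-120 | Project2HowDoesItRank/poker_hand.py | __get_high_cards_in_pairs
-- ===== SOURCE A (Python) =====
-- THREE_OF_A_KIND = 3
--
-- def __get_high_cards_in_pairs(hand_ranks):
--     """
--     Gets high cards from a list of pairs or two-pairs and creates a new list of high card ranks.
--
--     :param hand_ranks: Given list of ranks in hand.
--     :return: List of high cards (cards that are not pairs).
--     """
--     pairs = []
--     high_card = []
--     for rank in hand_ranks:
--         if rank not in pairs:
--             if hand_ranks.count(rank) > 1:
--                 if hand_ranks.count(rank) == THREE_OF_A_KIND: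
--                     high_card.append(rank)
--                 pairs.append(rank)
--             else:
--                 high_card.append(rank)
--
--     return high_card
-- ===== SOURCE B (Python) =====
-- THREE_OF_A_KIND = 3
--
--
-- def __get_high_cards_in_pairs(hand_ranks):
--     """One counting pass builds a frequency table; one flat pass over its
--     insertion-ordered distinct keys keeps ranks occurring exactly once or
--     exactly three times (first-occurrence order, as in A)."""
--     counts = {}
--     for rank in hand_ranks:
--         counts[rank] = counts.get(rank, 0) + 1
--     return [rank for rank, count in counts.items()
--             if count == 1 or count == THREE_OF_A_KIND]
-- ===== Notes on version B (the rewrite author's own statement) =====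
-- stated objective: faster
-- what changed: Replaces A's per-element hand_ranks.count() scans and manual 'pairs' dedup list with one frequency-table pass (dict counting) followed by one flat pass over the insertion-ordered distinct keys keeping counts 1 or 3.
import Mathlib
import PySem

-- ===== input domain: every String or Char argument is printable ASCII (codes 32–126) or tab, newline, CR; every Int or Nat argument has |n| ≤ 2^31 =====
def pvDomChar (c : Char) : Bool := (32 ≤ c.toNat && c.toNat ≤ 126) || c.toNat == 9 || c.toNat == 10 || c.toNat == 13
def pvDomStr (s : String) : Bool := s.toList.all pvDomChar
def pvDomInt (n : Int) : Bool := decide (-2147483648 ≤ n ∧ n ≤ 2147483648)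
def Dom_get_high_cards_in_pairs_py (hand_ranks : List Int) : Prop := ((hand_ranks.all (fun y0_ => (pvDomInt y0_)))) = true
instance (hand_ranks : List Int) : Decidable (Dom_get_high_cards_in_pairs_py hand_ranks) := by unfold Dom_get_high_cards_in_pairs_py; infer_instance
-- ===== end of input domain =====

-- B replaces A's per-element full-list .count() scans and manual 'pairs' dedup list
-- with one dict counting pass plus one flat pass over distinct keys (counts 1 or 3).

-- ===== PORT A =====
def get_high_cards_in_pairs_py (hand_ranks : List Int) : List Int :=
  (hand_ranks.foldl
    (fun (st : List Int × List Int) rank =>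
      if rank ∉ st.1 then
        if PySem.List.count hand_ranks rank > 1 then
          if PySem.List.count hand_ranks rank = 3 then (st.1 ++ [rank], st.2 ++ [rank])
          else (st.1 ++ [rank], st.2)
        else (st.1, st.2 ++ [rank])
      else st)
    ([], [])).2

-- ===== PORT B =====
def get_high_cards_in_pairs_py_alt (hand_ranks : List Int) : List Int :=
  let counts : PySem.Dict Int Int :=
    hand_ranks.foldl (fun d rank => d.insert rank (d.getD rank 0 + 1)) PySem.Dict.empty
  (counts.items.filter (fun p => p.2 == 1 || p.2 == 3)).map (fun p => p.1)

-- ===== PRECONDITION & SPEC =====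
def Spec_get_high_cards_in_pairs_py (hand_ranks : List Int) (out : List Int) : Prop := out = get_high_cards_in_pairs_py_alt hand_ranks
instance (hand_ranks : List Int) (out : List Int) : Decidable (Spec_get_high_cards_in_pairs_py hand_ranks out) := by unfold Spec_get_high_cards_in_pairs_py; infer_instance

-- ===== CLAIM (what is proved, stated in full; the proofs are below) =====
def Claim_equal_get_high_cards_in_pairs_py : Prop := ∀ (hand_ranks : List Int), Dom_get_high_cards_in_pairs_py hand_ranks → Spec_get_high_cards_in_pairs_py hand_ranks (get_high_cards_in_pairs_py hand_ranks)

-- ===== LEMMAS AND PROOFS =====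

-- A's per-element keep test, as a function of the full list's count of a rank.
def pvPred (full : List Int) (r : Int) : Bool :=
  if List.count r full > 1 then List.count r full == 3 else true

-- filtering after a discard = filtering with the extra "not equal" conjunct
theorem pv_filter_discard (s : List Int) (r : Int) (q : Int → Bool) :
    (PySem.Set.discard s r).filter q = s.filter (fun x => q x && !(x == r)) := by
  simp [PySem.Set.discard, List.filter_filter]

-- A's loop, characterised: it appends to high the first occurrences of l not yet
-- in pairs that pass pvPred, provided l's counts are bounded by full's counts.
theorem pv_loopA (full : List Int) :
    ∀ (l pairs high : List Int), (∀ r : Int, l.count r ≤ full.count r) →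
    (l.foldl
      (fun (st : List Int × List Int) rank =>
        if rank ∉ st.1 then
          if List.count rank full > 1 then
            if List.count rank full = 3 then (st.1 ++ [rank], st.2 ++ [rank])
            else (st.1 ++ [rank], st.2)
          else (st.1, st.2 ++ [rank])
        else st)
      (pairs, high)).2
    = high ++ (PySem.Set.ofList l).filter (fun x => !(decide (x ∈ pairs)) && pvPred full x) := by
  intro l
  induction l with
  | nil => intro pairs high _; simp
  | cons r t ih =>
    intro pairs high hcnt
    have hcnt_t : ∀ x : Int, t.count x ≤ full.count x := by
      intro x
      exact le_trans ((List.sublist_cons_self r t).count_le x) (hcnt x)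
    have hr1 : 1 ≤ full.count r := le_trans (by simp) (hcnt r)
    rw [PySem.Set.ofList_cons]
    simp only [List.foldl_cons]
    by_cases hmem : r ∈ pairs
    · rw [if_neg (not_not_intro hmem)]
      rw [ih pairs high hcnt_t]
      simp only [List.filter_cons]
      have hq : (!(decide (r ∈ pairs)) && pvPred full r) = false := by simp [hmem]
      rw [hq, if_neg Bool.false_ne_true, pv_filter_discard]
      congr 1
      apply List.filter_congr
      intro x _
      by_cases hxr : x = r
      · subst hxr; simp [hmem]
      · simp [hxr]
    · rw [if_pos hmem]
      by_cases hgt : List.count r full > 1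
      · rw [if_pos hgt]
        by_cases h3 : List.count r full = 3
        · rw [if_pos h3]
          rw [ih (pairs ++ [r]) (high ++ [r]) hcnt_t]
          simp only [List.filter_cons]
          have hq : (!(decide (r ∈ pairs)) && pvPred full r) = true := by
            simp [hmem, pvPred, h3]
          rw [hq, if_pos rfl, pv_filter_discard, List.append_assoc, List.singleton_append]
          congr 2
          apply List.filter_congr
          intro x _
          by_cases hxr : x = r
          · subst hxr; simp
          · simp [hxr]
        · rw [if_neg h3]
          rw [ih (pairs ++ [r]) high hcnt_t]
          simp only [List.filter_cons]
          have hq : (!(decide (r ∈ pairs)) && pvPred full r) = false := by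
            simp [pvPred, hgt, h3]
          rw [hq, if_neg Bool.false_ne_true, pv_filter_discard]
          congr 1
          apply List.filter_congr
          intro x _
          by_cases hxr : x = r
          · subst hxr; simp [pvPred, hgt]
          · simp [hxr]
      · rw [if_neg hgt]
        have h1 : List.count r full = 1 := by omega
        have hrt : r ∉ t := by
          have h := hcnt r
          simp only [List.count_cons_self] at h
          exact List.count_eq_zero.mp (by omega)
        rw [ih pairs (high ++ [r]) hcnt_t]
        simp only [List.filter_cons]
        have hq : (!(decide (r ∈ pairs)) && pvPred full r) = true := by
          simp [hmem, pvPred, h1]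
        rw [hq, if_pos rfl, pv_filter_discard, List.append_assoc, List.singleton_append]
        congr 2
        apply List.filter_congr
        intro x hx
        have hxr : x ≠ r := fun h => hrt (h ▸ (PySem.Set.mem_ofList _ _).mp hx)
        simp [hxr]

-- ===== VERDICT (by name: the statement is the Claim_ definition above) =====
theorem get_high_cards_in_pairs_py_spec : Claim_equal_get_high_cards_in_pairs_py := by
  intro hand_ranks _
  unfold Spec_get_high_cards_in_pairs_py get_high_cards_in_pairs_py get_high_cards_in_pairs_py_alt
  simp only [PySem.List.count_eq]
  refine Eq.trans (pv_loopA hand_ranks hand_ranks [] [] (fun r => le_refl _)) ?_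
  simp only [PySem.Dict.foldl_insert_getD_add_one_eq_counter, PySem.Dict.items_counter,
    List.filter_map, List.map_map, Function.comp_def, List.map_id',
    List.nil_append, List.not_mem_nil, decide_false, Bool.not_false, Bool.true_and]
  apply List.filter_congr
  intro x hx
  have hx1 : 1 ≤ List.count x hand_ranks :=
    List.one_le_count_iff.mpr ((PySem.Set.mem_ofList _ _).mp hx)
  unfold pvPred
  by_cases h1 : List.count x hand_ranks = 1
  · simp [h1]
  · by_cases h3 : List.count x hand_ranks = 3
    · simp [h3]
    · have hgt : List.count x hand_ranks > 1 := by omega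
      have hne1 : ¬ ((List.count x hand_ranks : Int) = 1) := by
        exact_mod_cast (by omega : ¬ List.count x hand_ranks = 1)
      have hne3 : ¬ ((List.count x hand_ranks : Int) = 3) := by exact_mod_cast h3
      rw [beq_eq_false_iff_ne.mpr h3, beq_eq_false_iff_ne.mpr hne1,
        beq_eq_false_iff_ne.mpr hne3]
      simp [hgt]
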